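-- pv_equiv track=rewrite | github.com/ViktorOgnev/kaiten-cli | src/kaiten_cli/runtime/trace.py | redact_argv
-- ===== SOURCE A (Python) =====
-- REDACTED_ARG_VALUE = "[REDACTED]"
--
-- _SENSITIVE_FLAGS = {"--token"}
--
-- def redact_argv(argv: list[str]) -> list[str]:
--     redacted: list[str] = []
--     skip_next = False
--     for value in argv:
--         if skip_next:
--             redacted.append(REDACTED_ARG_VALUE)
--             skip_next = False
--             continue
--         if value in _SENSITIVE_FLAGS:
--             redacted.append(value)
--             skip_next = True
--             continue
--         for flag in _SENSITIVE_FLAGS: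
--             prefix = f"{flag}="
--             if value.startswith(prefix):
--                 redacted.append(f"{prefix}{REDACTED_ARG_VALUE}")
--                 break
--         else:
--             redacted.append(value)
--     return redacted
-- ===== SOURCE B (Python) =====
-- REDACTED_ARG_VALUE = "[REDACTED]"
--
-- _SENSITIVE_FLAGS = {"--token"}
--
-- def redact_argv(argv: list[str]) -> list[str]:
--     def mask(v: str) -> str:
--         return "--token=" + REDACTED_ARG_VALUE if v.startswith("--token=") else v
--     out: list[str] = []
--     rest = argv
--     while "--token" in rest:
--         j = rest.index("--token")
--         out.extend(mask(v) for v in rest[:j])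
--         out.append("--token")
--         if j + 1 < len(rest):
--             out.append(REDACTED_ARG_VALUE)
--         rest = rest[j + 2:]
--     out.extend(mask(v) for v in rest)
--     return out
-- ===== Notes on version B (the rewrite author's own statement) =====
-- stated objective: alternative
-- what changed: Replaces A's element-by-element state machine (skip_next flag) with a find-and-split algorithm: repeatedly locate the next '--token' with list.index, emit the masked segment before it via a map, emit the flag plus redacted value, and slice past both; no per-element carried state.
import Mathlib
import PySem

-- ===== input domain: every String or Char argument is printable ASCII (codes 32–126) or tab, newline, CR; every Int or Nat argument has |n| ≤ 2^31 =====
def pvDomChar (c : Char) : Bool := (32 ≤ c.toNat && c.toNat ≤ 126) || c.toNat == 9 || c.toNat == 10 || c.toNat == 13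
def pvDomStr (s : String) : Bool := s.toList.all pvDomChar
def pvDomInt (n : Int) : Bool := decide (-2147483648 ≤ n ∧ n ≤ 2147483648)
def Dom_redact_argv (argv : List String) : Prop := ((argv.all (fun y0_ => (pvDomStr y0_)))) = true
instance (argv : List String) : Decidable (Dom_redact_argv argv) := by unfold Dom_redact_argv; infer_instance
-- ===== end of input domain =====

-- B replaces A's skip_next state machine with a find-and-split loop (list.index,
-- map over the segment, slice past flag and value): an alternative decomposition, same cost.

-- ===== PORT A =====
-- A's loop state: (redacted list so far, skip_next)
def redactStep (st : List String × Bool) (value : String) : List String × Bool :=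
  if st.2 then (st.1 ++ ["[REDACTED]"], false)
  else if value == "--token" then (st.1 ++ [value], true)
  -- the inner for/else over the one-element set _SENSITIVE_FLAGS: one startswith test
  else if PySem.Str.startswith value "--token=" then (st.1 ++ ["--token=[REDACTED]"], false)
  else (st.1 ++ [value], false)

def redact_argv (argv : List String) : List String :=
  (argv.foldl redactStep ([], false)).1

-- ===== PORT B =====
-- Source B's helper mask
def maskB (v : String) : String :=
  if PySem.Str.startswith v "--token=" then "--token=" ++ "[REDACTED]" else v

-- Source B's while loop over the shrinking suffix `rest`
def redactLoopB (rest : List String) : List String :=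
  match hj : PySem.List.index? rest "--token" with
  | none => rest.map maskB                      -- '--token' not in rest: final out.extend
  | some j =>
      (PySem.List.slice rest none (some (j : Int))).map maskB
        ++ ["--token"]
        ++ (if j + 1 < rest.length then ["[REDACTED]"] else [])
        ++ redactLoopB (PySem.List.slice rest (some ((j : Int) + 2)) none)
termination_by rest.length
decreasing_by
  obtain ⟨pre, suf, hsp, -, -⟩ := (PySem.List.index?_eq_some_iff rest "--token" j).mp hj
  have hc : ((j : Int) + 2) = ((j + 2 : Nat) : Int) := by push_cast; ring
  rw [hc, PySem.List.slice_from_natCast]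
  have hlen : 0 < rest.length := by subst hsp; simp
  simp [List.length_drop]; omega

def redact_argv_alt (argv : List String) : List String :=
  redactLoopB argv

-- ===== PRECONDITION & SPEC =====
def Spec_redact_argv (argv : List String) (out : List String) : Prop := out = redact_argv_alt argv
instance (argv : List String) (out : List String) : Decidable (Spec_redact_argv argv out) := by unfold Spec_redact_argv; infer_instance

-- ===== CLAIM (what is proved, stated in full; the proofs are below) =====
def Claim_equal_redact_argv : Prop := ∀ (argv : List String), Dom_redact_argv argv → Spec_redact_argv argv (redact_argv argv)

-- ===== LEMMAS AND PROOFS =====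

-- reference recursion both ports are reduced to
def redactR : List String → List String
  | [] => []
  | v :: rest =>
    if v = "--token" then
      match rest with
      | [] => [v]
      | _ :: rest' => v :: "[REDACTED]" :: redactR rest'
    else maskB v :: redactR rest

theorem redactR_cons_ne (v : String) (rest : List String) (h : v ≠ "--token") :
    redactR (v :: rest) = maskB v :: redactR rest := by
  rw [redactR.eq_def]
  simp [h]

theorem maskB_eq (v : String) :
    maskB v = if PySem.Str.startswith v "--token=" then "--token=[REDACTED]" else v := by
  rw [maskB]
  rfl

theorem redact_foldl_R : ∀ (argv : List String) (acc : List String),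
    (argv.foldl redactStep (acc, false)).1 = acc ++ redactR argv := by
  intro argv
  induction argv using redactR.induct with
  | case1 => intro acc; simp [redactR]
  | case2 => intro acc; simp [List.foldl, redactStep, redactR]
  | case3 r rest' ih =>
    intro acc
    simp only [List.foldl, redactStep, beq_self_eq_true, if_pos, Bool.false_eq_true]
    rw [redactR.eq_def]
    simp [ih]
  | case4 v rest h ih =>
    intro acc
    rw [redactR_cons_ne v rest h, maskB_eq]
    have hb : (v == "--token") = false := beq_eq_false_iff_ne.mpr h
    simp only [List.foldl, redactStep, hb, Bool.false_eq_true, if_false]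
    split_ifs <;> rw [ih] <;> simp

theorem redactR_append_clean (pre l : List String) (h : "--token" ∉ pre) :
    redactR (pre ++ l) = pre.map maskB ++ redactR l := by
  induction pre with
  | nil => simp
  | cons x xs ih =>
    simp only [List.mem_cons, not_or] at h
    rw [List.cons_append, redactR_cons_ne x _ (fun he => h.1 he.symm), ih h.2]
    simp

theorem redactR_map_clean (l : List String) (h : "--token" ∉ l) :
    redactR l = l.map maskB := by
  have h2 := redactR_append_clean l [] h
  simp only [List.append_nil] at h2
  rw [h2, redactR]
  simp

theorem redactR_cons_tok (y : String) (s : List String) :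
    redactR ("--token" :: y :: s) = "--token" :: "[REDACTED]" :: redactR s := by
  rw [redactR.eq_def]
  simp

theorem redactLoopB_eq_R : ∀ (rest : List String), redactLoopB rest = redactR rest := by
  intro rest
  induction rest using redactLoopB.induct with
  | case1 rest hj =>
    rw [redactLoopB.eq_def]
    split
    case h_2 => rename_i j hj2; rw [hj] at hj2; exact absurd hj2 (by simp)
    exact (redactR_map_clean rest ((PySem.List.index?_eq_none_iff rest "--token").mp hj)).symm
  | case2 rest j hj ih =>
    rw [redactLoopB.eq_def]
    split
    case h_1 => rename_i hj2; rw [hj] at hj2; exact absurd hj2 (by simp)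
    rename_i j2 hj2
    rw [hj] at hj2
    injection hj2 with hjj
    subst hjj
    obtain ⟨pre, suf, hsp, hlen, hnot⟩ := (PySem.List.index?_eq_some_iff rest "--token" j).mp hj
    subst hsp
    have hslice1 : PySem.List.slice (pre ++ "--token" :: suf) none (some (j : Int)) = pre := by
      rw [PySem.List.slice_to_natCast, ← hlen, List.take_left]
    have hcast : ((j : Int) + 2) = ((j + 2 : Nat) : Int) := by push_cast; ring
    have hslice2 : PySem.List.slice (pre ++ "--token" :: suf) (some ((j : Int) + 2)) none
        = suf.drop 1 := by
      rw [hcast, PySem.List.slice_from_natCast, ← hlen, ← List.drop_drop, List.drop_left]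
      rfl
    rw [hslice2] at ih
    rw [hslice1, hslice2]
    rw [redactR_append_clean pre _ hnot]
    cases suf with
    | nil =>
      rw [if_neg (by simp; omega)]
      rw [ih]
      simp [redactR]
    | cons y s =>
      rw [if_pos (by simp; omega)]
      rw [ih]
      simp only [List.drop_succ_cons, List.drop_zero]
      rw [redactR_cons_tok]
      simp

-- ===== VERDICT (by name: the statement is the Claim_ definition above) =====
theorem redact_argv_spec : Claim_equal_redact_argv := by
  intro argv _
  unfold Spec_redact_argv redact_argv redact_argv_alt
  rw [redactLoopB_eq_R]
  simpa using redact_foldl_R argv []
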